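-- pv_equiv track=rewrite | github.com/ElectroWave182/Diviser_pour_regner_TP_2 | exercice 3.py | pic_imp
-- ===== SOURCE A (Python) =====
-- def gestion_col (mat, ligne, colonne):
--
--     val = mat[ligne][colonne]
--
--     if colonne == 0:
--         return (True, val >= mat[ligne][colonne + 1])
--     elif colonne == len (mat[0]) - 1:
--         return (val >= mat[ligne][colonne - 1], True)
--     else:
--         return (val >= mat[ligne][colonne - 1], val >= mat[ligne][colonne + 1])
--
-- def pic_imp (mat):
--
--     pics = []
--     nb_lignes = len (mat)
--     nb_colonnes = len (mat[0])
--     for ligne in range (nb_lignes):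
--         for colonne in range (nb_colonnes):
--
--             val = mat[ligne][colonne]
--
--             if ligne == 0:
--                 haut = True
--                 bas = val >= mat[ligne + 1][colonne]
--                 gauche, droite = gestion_col (mat, ligne, colonne)
--
--             elif ligne == nb_lignes - 1:
--                 haut = val >= mat[ligne - 1][colonne]
--                 bas = True
--                 gauche, droite = gestion_col (mat, ligne, colonne)
--
--             else:
--                 haut = val >= mat[ligne - 1][colonne]
--                 bas = val >= mat[ligne + 1][colonne]
--                 gauche, droite = gestion_col (mat, ligne, colonne)
--
--             if haut and bas and gauche and droite:
--                 pics.append ((val, ligne, colonne))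
--
--     return pics
-- ===== SOURCE B (Python) =====
-- def pic_imp(mat):
--     # Build boolean neighbor masks by zipping each row/column sequence with its
--     # shifted self; out-of-bounds neighbors contribute a True border.
--     m = len(mat[0])
--     rows = [row[:m] for row in mat]
--
--     def ge(xs, ys):
--         return [x >= y for x, y in zip(xs, ys)]
--
--     ok_rows = []
--     for row in rows:
--         left = [True] + ge(row[1:], row)
--         right = ge(row, row[1:]) + [True]
--         ok_rows.append([a and b for a, b in zip(left, right)])
--
--     up = [[True] * m] + [ge(r2, r1) for r1, r2 in zip(rows, rows[1:])]
--     down = [ge(r1, r2) for r1, r2 in zip(rows, rows[1:])] + [[True] * m]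
--
--     pics = []
--     for i, (row, h, u, d) in enumerate(zip(rows, ok_rows, up, down)):
--         for j, (v, a, b, c) in enumerate(zip(row, h, u, d)):
--             if a and b and c:
--                 pics.append((v, i, j))
--     return pics
-- ===== Notes on version B (the rewrite author's own statement) =====
-- stated objective: alternative
-- what changed: Replaces the per-cell boundary case analysis (gestion_col plus three row branches) by precomputed boolean neighbor masks built by zipping each row/column with its shifted self, then a single zip/enumerate sweep collects the peaks; no index arithmetic or boundary branches remain.
import Mathlib
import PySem

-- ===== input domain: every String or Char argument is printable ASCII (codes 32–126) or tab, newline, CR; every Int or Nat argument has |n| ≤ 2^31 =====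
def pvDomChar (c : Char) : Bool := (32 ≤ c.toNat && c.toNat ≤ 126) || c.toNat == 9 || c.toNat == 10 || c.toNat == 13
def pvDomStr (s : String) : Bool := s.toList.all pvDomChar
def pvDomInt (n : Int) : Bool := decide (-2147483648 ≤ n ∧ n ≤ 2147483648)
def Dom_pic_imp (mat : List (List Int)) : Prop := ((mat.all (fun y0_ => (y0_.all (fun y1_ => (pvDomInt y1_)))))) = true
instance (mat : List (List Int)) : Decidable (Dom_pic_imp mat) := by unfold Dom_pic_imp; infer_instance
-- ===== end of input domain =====

-- B replaces gestion_col's boundary case analysis by shifted-zip neighbor masks; equal cost, different structure.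

-- ===== PORT A =====
-- mat[i][j] on in-range indices (Pre_ keeps every access of A in range)
def pyCell (mat : List (List Int)) (i j : Int) : Int :=
  PySem.List.pyGetD (PySem.List.pyGetD mat i []) j 0

def gestion_col (mat : List (List Int)) (ligne colonne : Int) : Bool × Bool :=
  let val := pyCell mat ligne colonne
  if colonne == 0 then
    (true, decide (val ≥ pyCell mat ligne (colonne + 1)))
  else if colonne == ((PySem.List.pyGetD mat 0 []).length : Int) - 1 then
    (decide (val ≥ pyCell mat ligne (colonne - 1)), true)
  else
    (decide (val ≥ pyCell mat ligne (colonne - 1)), decide (val ≥ pyCell mat ligne (colonne + 1)))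

def pic_imp (mat : List (List Int)) : List (Int × Int × Int) :=
  let nb_lignes : Int := (mat.length : Int)
  let nb_colonnes : Int := ((PySem.List.pyGetD mat 0 []).length : Int)
  (PySem.List.pyRange 0 nb_lignes 1).foldl (fun pics ligne =>
    (PySem.List.pyRange 0 nb_colonnes 1).foldl (fun pics colonne =>
      let val := pyCell mat ligne colonne
      let hb : Bool × Bool :=
        if ligne == 0 then
          (true, decide (val ≥ pyCell mat (ligne + 1) colonne))
        else if ligne == nb_lignes - 1 then
          (decide (val ≥ pyCell mat (ligne - 1) colonne), true)
        else
          (decide (val ≥ pyCell mat (ligne - 1) colonne), decide (val ≥ pyCell mat (ligne + 1) colonne))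
      let gd := gestion_col mat ligne colonne
      if hb.1 && hb.2 && gd.1 && gd.2 then pics ++ [(val, ligne, colonne)] else pics) pics) []

-- ===== PORT B =====
-- ge(xs, ys) = [x >= y for x, y in zip(xs, ys)]
def geL (xs ys : List Int) : List Bool := (xs.zip ys).map (fun p => decide (p.1 ≥ p.2))

def pic_imp_alt (mat : List (List Int)) : List (Int × Int × Int) :=
  let m : Nat := (PySem.List.pyGetD mat 0 []).length
  let rows : List (List Int) := mat.map (fun row => PySem.List.slice row none (some (m : Int)))
  let okRows : List (List Bool) := rows.map (fun row =>
    let left := true :: geL (PySem.List.slice row (some 1) none) row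
    let right := geL row (PySem.List.slice row (some 1) none) ++ [true]
    (left.zip right).map (fun p => p.1 && p.2))
  let up : List (List Bool) :=
    (List.replicate m true) :: (rows.zip (PySem.List.slice rows (some 1) none)).map (fun p => geL p.2 p.1)
  let down : List (List Bool) :=
    (rows.zip (PySem.List.slice rows (some 1) none)).map (fun p => geL p.1 p.2) ++ [List.replicate m true]
  (PySem.List.enumerate (((rows.zip okRows).zip up).zip down) 0).foldl (fun pics x =>
    (PySem.List.enumerate (((x.2.1.1.1.zip x.2.1.1.2).zip x.2.1.2).zip x.2.2) 0).foldl (fun pics y =>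
      if y.2.1.1.2 && y.2.1.2 && y.2.2 then pics ++ [(y.2.1.1.1, x.1, y.1)] else pics) pics) []

-- ===== PRECONDITION & SPEC =====
-- Pre_ is exactly the set of inputs on which the Python A returns: a nonempty matrix whose
-- first row is empty (loops run zero columns), or one with at least two rows, at least two
-- columns, and every row at least as long as the first (all neighbor probes in range).
def Pre_pic_imp (mat : List (List Int)) : Prop :=
  mat ≠ [] ∧
    ((mat.getD 0 []).length = 0 ∨
      (2 ≤ mat.length ∧ 2 ≤ (mat.getD 0 []).length ∧
        ∀ r ∈ mat, (mat.getD 0 []).length ≤ r.length))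
instance (mat : List (List Int)) : Decidable (Pre_pic_imp mat) := by unfold Pre_pic_imp; infer_instance

def pvWitness_pic_imp : List (List Int) := [[1, 2], [3, 4]]

def Spec_pic_imp (mat : List (List Int)) (out : List (Int × Int × Int)) : Prop := out = pic_imp_alt mat
instance (mat : List (List Int)) (out : List (Int × Int × Int)) : Decidable (Spec_pic_imp mat out) := by unfold Spec_pic_imp; infer_instance

-- ===== CLAIM (what is proved, stated in full; the proofs are below) =====
def Claim_equal_pic_imp : Prop := ∀ (mat : List (List Int)), Dom_pic_imp mat → Pre_pic_imp mat → Spec_pic_imp mat (pic_imp mat)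


-- ===== LEMMAS AND PROOFS =====

-- the cell condition of A's inner loop body, as a standalone boolean
def condA (mat : List (List Int)) (ligne colonne : Int) : Bool :=
  let val := pyCell mat ligne colonne
  let hb : Bool × Bool :=
    if ligne == 0 then
      (true, decide (val ≥ pyCell mat (ligne + 1) colonne))
    else if ligne == ((mat.length : Int)) - 1 then
      (decide (val ≥ pyCell mat (ligne - 1) colonne), true)
    else
      (decide (val ≥ pyCell mat (ligne - 1) colonne), decide (val ≥ pyCell mat (ligne + 1) colonne))
  let gd := gestion_col mat ligne colonne
  hb.1 && hb.2 && gd.1 && gd.2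

-- names for the intermediate lists of B's port
def mB (mat : List (List Int)) : Nat := (PySem.List.pyGetD mat 0 []).length
def rowsB (mat : List (List Int)) : List (List Int) :=
  mat.map (fun row => PySem.List.slice row none (some ((mB mat : Nat) : Int)))
def okRowsB (mat : List (List Int)) : List (List Bool) :=
  (rowsB mat).map (fun row =>
    ((true :: geL (PySem.List.slice row (some 1) none) row).zip
      (geL row (PySem.List.slice row (some 1) none) ++ [true])).map (fun p => p.1 && p.2))
def upB (mat : List (List Int)) : List (List Bool) :=
  (List.replicate (mB mat) true) ::
    ((rowsB mat).zip (PySem.List.slice (rowsB mat) (some 1) none)).map (fun p => geL p.2 p.1)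
def downB (mat : List (List Int)) : List (List Bool) :=
  ((rowsB mat).zip (PySem.List.slice (rowsB mat) (some 1) none)).map (fun p => geL p.1 p.2) ++
    [List.replicate (mB mat) true]
def quadB (mat : List (List Int)) : List (((List Int × List Bool) × List Bool) × List Bool) :=
  (((rowsB mat).zip (okRowsB mat)).zip (upB mat)).zip (downB mat)

def dQuad : ((List Int × List Bool) × List Bool) × List Bool := ((([], []), []), [])
def dCell : ((Int × Bool) × Bool) × Bool := (((0, true), true), true)

def lstB (mat : List (List Int)) (i : Int) : List (((Int × Bool) × Bool) × Bool) :=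
  let q := PySem.List.pyGetD (quadB mat) i dQuad
  ((q.1.1.1.zip q.1.1.2).zip q.1.2).zip q.2

def innerB (mat : List (List Int)) (i : Int) : List (Int × Int × Int) :=
  ((PySem.List.pyRange 0 ((lstB mat i).length : Int)).filter (fun j =>
      let e := PySem.List.pyGetD (lstB mat i) j dCell
      e.1.1.2 && e.1.2 && e.2)).map (fun j =>
      ((PySem.List.pyGetD (lstB mat i) j dCell).1.1.1, i, j))

-- cell access and the four neighbor bits, total via getD
def cVal (mat : List (List Int)) (k j : Nat) : Int := (mat.getD k []).getD j 0
def bitHaut (mat : List (List Int)) (k j : Nat) : Bool :=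
  k == 0 || decide (cVal mat k j ≥ cVal mat (k - 1) j)
def bitBas (mat : List (List Int)) (n k j : Nat) : Bool :=
  k == n - 1 || decide (cVal mat k j ≥ cVal mat (k + 1) j)
def bitGauche (mat : List (List Int)) (k j : Nat) : Bool :=
  j == 0 || decide (cVal mat k j ≥ cVal mat k (j - 1))
def bitDroite (mat : List (List Int)) (m k j : Nat) : Bool :=
  j == m - 1 || decide (cVal mat k j ≥ cVal mat k (j + 1))

lemma rowsB_eq (mat : List (List Int)) : rowsB mat = mat.map (List.take (mB mat)) := by
  simp [rowsB, PySem.List.slice_to_natCast]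

lemma mB_eq (mat : List (List Int)) : mB mat = (mat.getD 0 []).length := by
  simp [mB, PySem.List.pyGetD_zero]

lemma pyGetD_int_add_one {α : Type} (xs : List α) (k : Nat) (d : α) :
    PySem.List.pyGetD xs ((k : Int) + 1) d = xs.getD (k + 1) d := by
  rw [show ((k : Int) + 1) = ((k + 1 : Nat) : Int) by push_cast; ring, PySem.List.pyGetD_natCast]

lemma pyGetD_int_sub_one {α : Type} (xs : List α) (k : Nat) (hk : 1 ≤ k) (d : α) :
    PySem.List.pyGetD xs ((k : Int) - 1) d = xs.getD (k - 1) d := by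
  rw [show ((k : Int) - 1) = ((k - 1 : Nat) : Int) by omega, PySem.List.pyGetD_natCast]

lemma A_norm (mat : List (List Int)) :
    pic_imp mat =
      (PySem.List.pyRange 0 (mat.length : Int)).flatMap (fun i =>
        ((PySem.List.pyRange 0 ((PySem.List.pyGetD mat 0 []).length : Int)).filter
            (fun j => condA mat i j)).map (fun j => (pyCell mat i j, i, j))) := by
  have step1 : pic_imp mat =
      (PySem.List.pyRange 0 (mat.length : Int)).foldl
        (fun pics i => pics ++
          ((PySem.List.pyRange 0 ((PySem.List.pyGetD mat 0 []).length : Int)).filter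
            (fun j => condA mat i j)).map (fun j => (pyCell mat i j, i, j))) [] := by
    unfold pic_imp
    refine PySem.List.foldl_congr_mem _ _ _ _ ?_
    intro acc x hx
    exact PySem.List.foldl_append_if (fun j => condA mat x j)
      (fun j => (pyCell mat x j, x, j)) _ acc
  rw [step1, PySem.List.foldl_append_eq_flatMap, List.nil_append]

lemma pvFlatMapCongr {α β : Type} (l : List α) (f g : α → List β)
    (h : ∀ x ∈ l, f x = g x) : l.flatMap f = l.flatMap g := by
  induction l with
  | nil => rfl
  | cons a l ih =>
    simp only [List.flatMap_cons, h a List.mem_cons_self,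
      ih (fun x hx => h x (List.mem_cons_of_mem _ hx))]

lemma B_norm (mat : List (List Int)) :
    pic_imp_alt mat =
      (PySem.List.pyRange 0 ((quadB mat).length : Int)).flatMap (fun i => innerB mat i) := by
  have step1 : pic_imp_alt mat =
      (PySem.List.enumerate (quadB mat) 0).foldl
        (fun pics (x : Int × (((List Int × List Bool) × List Bool) × List Bool)) => pics ++
          ((PySem.List.enumerate (((x.2.1.1.1.zip x.2.1.1.2).zip x.2.1.2).zip x.2.2) 0).filter
              (fun (y : Int × (((Int × Bool) × Bool) × Bool)) => y.2.1.1.2 && y.2.1.2 && y.2.2)).map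
            (fun y => (y.2.1.1.1, x.1, y.1))) [] := by
    unfold pic_imp_alt
    refine PySem.List.foldl_congr_mem _ _ _ _ ?_
    intro acc x hx
    exact PySem.List.foldl_append_if
      (fun (y : Int × (((Int × Bool) × Bool) × Bool)) => y.2.1.1.2 && y.2.1.2 && y.2.2)
      (fun y => (y.2.1.1.1, x.1, y.1)) _ acc
  rw [step1, PySem.List.foldl_append_eq_flatMap, List.nil_append,
    PySem.List.enumerate_eq_map_pyRange (quadB mat) dQuad, List.flatMap_map]
  refine pvFlatMapCongr _ _ _ ?_
  intro i hi
  show ((PySem.List.enumerate (lstB mat i) 0).filter _).map _ = innerB mat i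
  rw [PySem.List.enumerate_eq_map_pyRange (lstB mat i) dCell, List.filter_map, List.map_map]
  rfl

lemma len_quadB (mat : List (List Int)) (h : mat ≠ []) : (quadB mat).length = mat.length := by
  have hn : 0 < mat.length := List.length_pos_of_ne_nil h
  simp [quadB, okRowsB, upB, downB, rowsB_eq, PySem.List.slice_from_one]
  omega

-- under Pre_, every row of rowsB has length mB and entries of mat
def okFun (row : List Int) : List Bool :=
  ((true :: geL row.tail row).zip (geL row row.tail ++ [true])).map (fun p => p.1 && p.2)

lemma lstB_eq (mat : List (List Int)) (k : Nat) (hne : mat ≠ []) (hk : k < mat.length) :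
    lstB mat (k : Int) =
      ((((mat.getD k []).take (mB mat)).zip (okFun ((mat.getD k []).take (mB mat)))).zip
        (if k = 0 then List.replicate (mB mat) true
         else geL ((mat.getD k []).take (mB mat)) ((mat.getD (k - 1) []).take (mB mat)))).zip
      (if k = mat.length - 1 then List.replicate (mB mat) true
       else geL ((mat.getD k []).take (mB mat)) ((mat.getD (k + 1) []).take (mB mat))) := by
  have hq : k < (quadB mat).length := by rw [len_quadB mat hne]; exact hk
  have hlen := List.length_pos_of_ne_nil hne
  unfold lstB
  rw [PySem.List.pyGetD_natCast, List.getD_eq_getElem _ _ hq]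
  simp only [quadB, List.getElem_zip]
  congr 1
  · congr 1
    · congr 1 <;>
        simp [rowsB_eq, okRowsB, okFun, List.getD_eq_getElem?_getD, List.getElem?_eq_getElem, hk,
          PySem.List.slice_from_one]
    · -- up component
      by_cases hk0 : k = 0
      · subst hk0; simp [upB]
      · have hk1 : k - 1 < mat.length - 1 := by omega
        rcases Nat.exists_eq_add_of_lt (Nat.pos_of_ne_zero hk0) with ⟨k', hk'⟩
        simp only [hk', Nat.zero_add] at *
        simp [upB, rowsB_eq, List.getElem_cons_succ, List.getElem_zip, hk0,
          List.getD_eq_getElem?_getD, List.getElem?_eq_getElem, hk,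
          show k' < mat.length from by omega, List.getElem_tail, PySem.List.slice_from_one]
  · -- down component
    by_cases hkn : k = mat.length - 1
    · have : mat.length - 1 < mat.length := by have := List.length_pos_of_ne_nil hne; omega
      subst hkn
      simp [downB, rowsB_eq, PySem.List.slice_from_one]
      try rw [List.getElem_append_right (by simp [PySem.List.slice_from_one] <;> omega)]
      try simp
    · have hklt : k < mat.length - 1 := by omega
      simp [downB, rowsB_eq, PySem.List.slice_from_one]
      rw [List.getElem_append_left (by simp [PySem.List.slice_from_one] <;> omega)]
      simp [List.getElem_zip, List.getD_eq_getElem?_getD, List.getElem?_eq_getElem, hk,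
        show k + 1 < mat.length from by omega, List.getElem_tail, hkn,
        PySem.List.slice_from_one]

lemma take_getD_len (mat : List (List Int)) (hpre : Pre_pic_imp mat) (i : Nat)
    (hi : i < mat.length) : ((mat.getD i []).take (mB mat)).length = mB mat := by
  obtain ⟨hne, hcase⟩ := hpre
  have hmem : mat.getD i [] ∈ mat := by
    rw [List.getD_eq_getElem _ _ hi]; exact List.getElem_mem _
  rcases hcase with h0 | ⟨hn2, hm2, hrows⟩
  · have h0' : mB mat = 0 := by rw [mB_eq]; exact h0
    simp [h0']
  · have hb := hrows _ hmem
    rw [mB_eq]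
    simp only [List.getD_eq_getElem?_getD] at hb ⊢
    simp [List.length_take]
    omega

lemma len_lstB (mat : List (List Int)) (hpre : Pre_pic_imp mat) (k : Nat) (hk : k < mat.length) :
    (lstB mat (k : Int)).length = mB mat := by
  have hne := hpre.1
  rw [lstB_eq mat k hne hk]
  have e1 := take_getD_len mat hpre k hk
  have e2 := take_getD_len mat hpre (k - 1) (by omega)
  simp only [List.getD_eq_getElem?_getD, List.length_take] at e1 e2
  by_cases hk0 : k = 0 <;> by_cases hkn : k = mat.length - 1
  · simp only [if_pos hk0, if_pos hkn]
    simp [geL, okFun] <;> omega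
  · simp only [if_pos hk0, if_neg hkn]
    have e3 := take_getD_len mat hpre (k + 1) (by omega)
    simp only [List.getD_eq_getElem?_getD, List.length_take] at e3
    simp [geL, okFun] <;> omega
  · simp only [if_neg hk0, if_pos hkn]
    simp [geL, okFun] <;> omega
  · simp only [if_neg hk0, if_neg hkn]
    have e3 := take_getD_len mat hpre (k + 1) (by omega)
    simp only [List.getD_eq_getElem?_getD, List.length_take] at e3
    simp [geL, okFun] <;> omega

lemma lstB_getElem (mat : List (List Int)) (hpre : Pre_pic_imp mat) (k j : Nat)
    (hk : k < mat.length) (hj : j < mB mat) (hjl : j < (lstB mat (k : Int)).length) :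
    (lstB mat (k : Int))[j] =
      (((cVal mat k j, bitGauche mat k j && bitDroite mat (mB mat) k j),
        bitHaut mat k j), bitBas mat mat.length k j) := by
  have hne := hpre.1
  have hm_pos : 0 < mB mat := by omega
  have hcase2 : 2 ≤ mat.length ∧ 2 ≤ (mat.getD 0 []).length ∧
      ∀ r ∈ mat, (mat.getD 0 []).length ≤ r.length := by
    rcases hpre.2 with h0 | h2
    · exfalso; rw [mB_eq] at hm_pos; omega
    · exact h2
  obtain ⟨hn2, hm2, hrows⟩ := hcase2
  have hm2' : 2 ≤ mB mat := by rw [mB_eq]; exact hm2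
  have e1 := take_getD_len mat hpre k hk
  have e2 := take_getD_len mat hpre (k - 1) (by omega)
  have e1' : min (mB mat) (mat[k]?.getD []).length = mB mat := by
    simpa [List.length_take, List.getD_eq_getElem?_getD] using e1
  have e2' : min (mB mat) (mat[k - 1]?.getD []).length = mB mat := by
    simpa [List.length_take, List.getD_eq_getElem?_getD] using e2
  have hjrow : j < (mat[k]?.getD []).length := by omega
  have hk1row : j < (mat[k - 1]?.getD []).length := by omega
  simp only [lstB_eq mat k hne hk, List.getElem_zip, Prod.mk.injEq]
  refine ⟨⟨⟨?_, ?_⟩, ?_⟩, ?_⟩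
  · simp [cVal, List.getElem_take, List.getD_eq_getElem?_getD, List.getElem?_eq_getElem, hjrow]
  · -- horizontal mask component
    by_cases hj0 : j = 0
    · have hjm : ¬j = mB mat - 1 := by omega
      have hj1row : j + 1 < (mat[k]?.getD []).length := by omega
      have hjlt : j < mB mat - 1 := by omega
      simp [hjlt, hj1row, okFun, geL, bitGauche, bitDroite, hj0, hjm, cVal,
        List.getElem_map, List.getElem_zip, List.getElem_take, List.getElem_tail,
        List.getElem_append, List.getElem_cons, List.getD_eq_getElem?_getD,
        List.getElem?_eq_getElem, Bool.beq_eq_decide_eq, hjrow, hk1row, e1', e2',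
        show 1 < mB mat from by omega,
        show 1 < (mat[k]?.getD []).length from by omega,
        show 0 < (mat[k]?.getD []).length from by omega,
        show ¬(0 = mB mat - 1) from by omega,
        show ¬(mB mat - 1 = 0) from by omega]
    · by_cases hjm : j = mB mat - 1
      · simp [okFun, geL, bitGauche, bitDroite, hj0, hjm, cVal,
        List.getElem_map, List.getElem_zip, List.getElem_take, List.getElem_tail,
        List.getElem_append, List.getElem_cons, List.getD_eq_getElem?_getD,
        List.getElem?_eq_getElem, Bool.beq_eq_decide_eq, hjrow, hk1row, e1', e2',
        show 1 < mB mat from by omega,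
        show 1 < (mat[k]?.getD []).length from by omega,
        show 0 < (mat[k]?.getD []).length from by omega,
        show ¬(0 = mB mat - 1) from by omega,
        show ¬(mB mat - 1 = 0) from by omega,
          show mB mat - 1 < (mat[k]?.getD []).length from by omega,
          show mB mat - 1 - 1 < (mat[k]?.getD []).length from by omega,
          show mB mat - 1 - 1 + 1 = mB mat - 1 from by omega] <;> (try omega)
      · have hj1row : j + 1 < (mat[k]?.getD []).length := by omega
        have hjlt : j < mB mat - 1 := by omega
        simp [hjlt, hj1row, okFun, geL, bitGauche, bitDroite, hj0, hjm, cVal,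
        List.getElem_map, List.getElem_zip, List.getElem_take, List.getElem_tail,
        List.getElem_append, List.getElem_cons, List.getD_eq_getElem?_getD,
        List.getElem?_eq_getElem, Bool.beq_eq_decide_eq, hjrow, hk1row, e1', e2',
        show 1 < mB mat from by omega,
        show 1 < (mat[k]?.getD []).length from by omega,
        show 0 < (mat[k]?.getD []).length from by omega,
        show ¬(0 = mB mat - 1) from by omega,
        show ¬(mB mat - 1 = 0) from by omega,
          show j - 1 + 1 = j from by omega,
          show j - 1 < (mat[k]?.getD []).length from by omega] <;> (try omega)
  · -- up mask component
    by_cases hk0 : k = 0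
    · simp [if_pos hk0, bitHaut, hk0, List.getElem_replicate]
    · simp [if_neg hk0, bitHaut, hk0, geL, List.getElem_map, List.getElem_zip,
        List.getElem_take, cVal, List.getD_eq_getElem?_getD, List.getElem?_eq_getElem,
        Bool.beq_eq_decide_eq, hjrow, hk1row]
  · -- down mask component
    by_cases hkn : k = mat.length - 1
    · simp [if_pos hkn, bitBas, hkn, List.getElem_replicate,
        show mat.length - 1 == mat.length - 1 from by simp]
    · have e3 := take_getD_len mat hpre (k + 1) (by omega)
      have e3' : min (mB mat) (mat[k + 1]?.getD []).length = mB mat := by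
        simpa [List.length_take, List.getD_eq_getElem?_getD] using e3
      have hk3row : j < (mat[k + 1]?.getD []).length := by omega
      simp [if_neg hkn, bitBas, hkn, geL, List.getElem_map, List.getElem_zip,
        List.getElem_take, cVal, List.getD_eq_getElem?_getD, List.getElem?_eq_getElem,
        Bool.beq_eq_decide_eq, hjrow, hk3row,
        show ¬(k = mat.length - 1) from hkn]

lemma condA_eq (mat : List (List Int)) (hpre : Pre_pic_imp mat) (k j : Nat)
    (hk : k < mat.length) (hj : j < mB mat) :
    condA mat (k : Int) (j : Int) =
      (bitHaut mat k j && bitBas mat mat.length k j &&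
        (bitGauche mat k j && bitDroite mat (mB mat) k j)) := by
  obtain ⟨hne, hcase⟩ := hpre
  rcases hcase with h0 | ⟨hn2, hm2, hrows⟩
  · rw [mB_eq] at hj; omega
  · rw [mB_eq] at hj ⊢
    have hm2' : 2 ≤ (mat[0]?.getD []).length := by
      simpa [List.getD_eq_getElem?_getD] using hm2
    by_cases hk0 : k = 0 <;> by_cases hkn : k = mat.length - 1 <;>
      by_cases hj0 : j = 0 <;> by_cases hjm : j = (mat[0]?.getD []).length - 1 <;>
      first
      | omega
      | (simp only [condA, gestion_col, pyCell, cVal, mB_eq, bitHaut, bitBas, bitGauche, bitDroite,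
          PySem.List.pyGetD_natCast, PySem.List.pyGetD_ofNat', pyGetD_int_add_one,
          Bool.beq_eq_decide_eq, Nat.cast_eq_zero, Int.natCast_eq_zero] <;>
         (try rw [pyGetD_int_sub_one _ k (by omega)]) <;>
         (try rw [pyGetD_int_sub_one _ j (by omega)]) <;>
         (first
           | (simp [hk0, hkn, hj0, hjm, Bool.beq_eq_decide_eq, List.getD_eq_getElem?_getD,
           show ¬(0 = mat.length - 1) by omega,
           show ¬(0 = (mat[0]?.getD []).length - 1) by have := hm2'; omega,
           show ¬((mat[0]?.getD []).length - 1 = 0) by have := hm2'; omega,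
           show (((mat[0]?.getD []).length - 1 : Nat) : Int) = ((mat[0]?.getD []).length : Int) - 1 by have := hm2'; omega,
           show ¬(mat.length - 1 = 0) by omega,
           show ((mat.length - 1 : Nat) : Int) = ((mat.length : Int)) - 1 by omega, Bool.and_assoc, show ¬((j : Int) = ((mat[0]?.getD []).length : Int) - 1) by have := hm2'; omega, show ¬((k : Int) = ((mat.length : Int)) - 1) by omega] <;> (try omega))
           | (simp [hk0, hkn, hj0, hjm, Bool.beq_eq_decide_eq, List.getD_eq_getElem?_getD,
           show ¬(0 = mat.length - 1) by omega,
           show ¬(0 = (mat[0]?.getD []).length - 1) by have := hm2'; omega,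
           show ¬((mat[0]?.getD []).length - 1 = 0) by have := hm2'; omega,
           show (((mat[0]?.getD []).length - 1 : Nat) : Int) = ((mat[0]?.getD []).length : Int) - 1 by have := hm2'; omega,
           show ¬(mat.length - 1 = 0) by omega,
           show ((mat.length - 1 : Nat) : Int) = ((mat.length : Int)) - 1 by omega, Bool.and_assoc, show ¬((j : Int) = ((mat[0]?.getD []).length : Int) - 1) by have := hm2'; omega] <;> (try omega))
           | (simp [hk0, hkn, hj0, hjm, Bool.beq_eq_decide_eq, List.getD_eq_getElem?_getD,
           show ¬(0 = mat.length - 1) by omega,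
           show ¬(0 = (mat[0]?.getD []).length - 1) by have := hm2'; omega,
           show ¬((mat[0]?.getD []).length - 1 = 0) by have := hm2'; omega,
           show (((mat[0]?.getD []).length - 1 : Nat) : Int) = ((mat[0]?.getD []).length : Int) - 1 by have := hm2'; omega,
           show ¬(mat.length - 1 = 0) by omega,
           show ((mat.length - 1 : Nat) : Int) = ((mat.length : Int)) - 1 by omega, Bool.and_assoc, show ¬((k : Int) = ((mat.length : Int)) - 1) by omega] <;> (try omega))
           | (simp [hk0, hkn, hj0, hjm, Bool.beq_eq_decide_eq, List.getD_eq_getElem?_getD,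
           show ¬(0 = mat.length - 1) by omega,
           show ¬(0 = (mat[0]?.getD []).length - 1) by have := hm2'; omega,
           show ¬((mat[0]?.getD []).length - 1 = 0) by have := hm2'; omega,
           show (((mat[0]?.getD []).length - 1 : Nat) : Int) = ((mat[0]?.getD []).length : Int) - 1 by have := hm2'; omega,
           show ¬(mat.length - 1 = 0) by omega,
           show ((mat.length - 1 : Nat) : Int) = ((mat.length : Int)) - 1 by omega, Bool.and_assoc] <;> (try omega))))

lemma pyCell_eq (mat : List (List Int)) (k j : Nat) :
    pyCell mat (k : Int) (j : Int) = cVal mat k j := by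
  simp [pyCell, cVal, PySem.List.pyGetD_natCast]

lemma pvAndRot (a b c d : Bool) : (a && b && (c && d)) = (c && d && a && b) := by
  cases a <;> cases b <;> cases c <;> cases d <;> rfl

-- ===== VERDICT (by name: the statement is the Claim_ definition above) =====
theorem pic_imp_spec : Claim_equal_pic_imp := by
  intro mat hdom hpre
  unfold Spec_pic_imp
  have hne := hpre.1
  rw [A_norm, B_norm, len_quadB mat hne]
  refine pvFlatMapCongr _ _ _ ?_
  intro i hi
  rw [PySem.List.mem_pyRange_one] at hi
  obtain ⟨hi0, hin⟩ := hi
  lift i to ℕ using hi0 with k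
  have hk : k < mat.length := by exact_mod_cast hin
  unfold innerB
  have hlen : (((lstB mat (k : Int)).length : Nat) : Int) = ((mB mat : Nat) : Int) := by
    rw [len_lstB mat hpre k hk]
  rw [hlen]
  have hM : (((PySem.List.pyGetD mat 0 []).length : Nat) : Int) = ((mB mat : Nat) : Int) := rfl
  rw [hM]
  have hpt : ∀ j ∈ PySem.List.pyRange 0 ((mB mat : Nat) : Int),
      condA mat (k : Int) j =
        ((PySem.List.pyGetD (lstB mat (k : Int)) j dCell).1.1.2 &&
          (PySem.List.pyGetD (lstB mat (k : Int)) j dCell).1.2 &&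
          (PySem.List.pyGetD (lstB mat (k : Int)) j dCell).2) := by
    intro j hj
    rw [PySem.List.mem_pyRange_one] at hj
    lift j to ℕ using hj.1 with jn
    have hjn : jn < mB mat := by exact_mod_cast hj.2
    have hjl : jn < (lstB mat (k : Int)).length := by
      rw [len_lstB mat hpre k hk]; exact hjn
    have he : PySem.List.pyGetD (lstB mat (k : Int)) (jn : Int) dCell =
        (((cVal mat k jn, bitGauche mat k jn && bitDroite mat (mB mat) k jn),
          bitHaut mat k jn), bitBas mat mat.length k jn) := by
      rw [PySem.List.pyGetD_natCast, List.getD_eq_getElem _ _ hjl,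
        lstB_getElem mat hpre k jn hk hjn hjl]
    rw [condA_eq mat hpre k jn hk hjn, he]
    exact (pvAndRot _ _ _ _).symm ▸
      (by cases bitHaut mat k jn <;> cases bitBas mat mat.length k jn <;>
          cases bitGauche mat k jn <;> cases bitDroite mat (mB mat) k jn <;> rfl)
  rw [List.filter_congr hpt]
  refine List.map_congr_left ?_
  intro j hj
  have hj' := List.mem_of_mem_filter hj
  rw [PySem.List.mem_pyRange_one] at hj'
  lift j to ℕ using hj'.1 with jn
  have hjn : jn < mB mat := by exact_mod_cast hj'.2
  have hjl : jn < (lstB mat (k : Int)).length := by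
    rw [len_lstB mat hpre k hk]; exact hjn
  have he : PySem.List.pyGetD (lstB mat (k : Int)) (jn : Int) dCell =
      (((cVal mat k jn, bitGauche mat k jn && bitDroite mat (mB mat) k jn),
        bitHaut mat k jn), bitBas mat mat.length k jn) := by
    rw [PySem.List.pyGetD_natCast, List.getD_eq_getElem _ _ hjl,
      lstB_getElem mat hpre k jn hk hjn hjl]
  rw [he, pyCell_eq]
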